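-- pv_equiv track=rewrite | github.com/raphaelcampos/stacking-bagged-boosted-forests | python/stacking_2kproject.py | get_elem
-- ===== SOURCE A (Python) =====
-- def get_elem(elems, n):
-- 	i = 0
-- 	leftmost = -1
-- 	tmp = []
-- 	while i < len(elems):
-- 		if (1 << i) & int(n):
-- 			leftmost = leftmost + 1
-- 			tmp.append(i)
-- 		i = i + 1
--
-- 	return tmp , leftmost
-- ===== SOURCE B (Python) =====
-- def get_elem(elems, n):
--     # O(popcount): reduce n modulo 2**len(elems), then strip one lowest set bit per step.
--     m = int(n) % (1 << len(elems))
--     tmp = []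
--     while m:
--         m2 = m & (m - 1)              # clear the lowest set bit
--         tmp.append((m ^ m2).bit_length() - 1)
--         m = m2
--     return tmp, len(tmp) - 1
-- ===== Notes on version B (the rewrite author's own statement) =====
-- stated objective: faster
-- what changed: B replaces A's scan over every index i < len(elems) testing (1<<i)&n by reducing n modulo 2**len(elems) once and then stripping one lowest set bit per iteration (m &= m-1), so the loop runs once per set bit instead of once per element.
import Mathlib
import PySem

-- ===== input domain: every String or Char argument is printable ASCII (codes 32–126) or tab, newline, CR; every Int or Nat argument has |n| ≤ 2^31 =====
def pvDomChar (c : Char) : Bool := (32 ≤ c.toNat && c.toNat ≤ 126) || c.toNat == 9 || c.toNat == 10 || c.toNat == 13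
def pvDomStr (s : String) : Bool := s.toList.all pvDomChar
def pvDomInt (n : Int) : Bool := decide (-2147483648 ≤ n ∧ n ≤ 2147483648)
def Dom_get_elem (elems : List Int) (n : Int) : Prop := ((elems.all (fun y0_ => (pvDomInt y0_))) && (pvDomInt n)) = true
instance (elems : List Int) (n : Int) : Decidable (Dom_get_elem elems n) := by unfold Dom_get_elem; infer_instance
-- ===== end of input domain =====

-- B replaces A's full index scan by reducing n modulo 2^len and stripping one lowest set bit
-- per iteration (O(popcount) loop steps instead of O(len)).

-- ===== PORT A =====
-- while i < len(elems): if (1 << i) & int(n): leftmost += 1; tmp.append(i); i += 1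
def getElemLoop (len : Nat) (n : Int) (i : Nat) (leftmost : Int) (tmp : List Int) : List Int × Int :=
  if _h : i < len then
    if PySem.Int.band ((1:Int) <<< i) n ≠ 0 then
      getElemLoop len n (i + 1) (leftmost + 1) (tmp ++ [(i : Int)])
    else
      getElemLoop len n (i + 1) leftmost tmp
  else
    (tmp, leftmost)
termination_by len - i

def get_elem (elems : List Int) (n : Int) : List Int × Int :=
  getElemLoop elems.length n 0 (-1) []

-- ===== PORT B =====
-- Python: 'while m:'; m starts as a nonnegative remainder and only loses bits, so on every
-- reachable state the guard 'm != 0' is exactly '0 < m' (the totalising guard used here).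
def getElemAltLoop (m : Int) (tmp : List Int) : List Int :=
  if h : 0 < m then
    let m2 := PySem.Int.band m (m - 1)
    getElemAltLoop m2 (tmp ++ [((PySem.Int.bitLength (PySem.Int.bxor m m2) : Int) - 1)])
  else tmp
termination_by m.toNat
decreasing_by
  have h1 : PySem.Int.band m (m - 1) = ((m.toNat &&& (m - 1).toNat : Nat) : Int) :=
    PySem.Int.band_of_nonneg (le_of_lt h) (by omega)
  have h2 : m.toNat &&& (m - 1).toNat ≤ (m - 1).toNat := Nat.and_le_right
  simp only [h1, Int.toNat_natCast]
  omega

def get_elem_alt (elems : List Int) (n : Int) : List Int × Int :=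
  let m := PySem.Int.mod n ((1:Int) <<< elems.length)
  let tmp := getElemAltLoop m []
  (tmp, (tmp.length : Int) - 1)

-- ===== PRECONDITION & SPEC =====
def Spec_get_elem (elems : List Int) (n : Int) (out : List Int × Int) : Prop := out = get_elem_alt elems n
instance (elems : List Int) (n : Int) (out : List Int × Int) : Decidable (Spec_get_elem elems n out) := by unfold Spec_get_elem; infer_instance

-- ===== CLAIM (what is proved, stated in full; the proofs are below) =====
def Claim_equal_get_elem : Prop := ∀ (elems : List Int) (n : Int), Dom_get_elem elems n → Spec_get_elem elems n (get_elem elems n)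

-- ===== LEMMAS AND PROOFS =====

-- ascending list of set-bit positions of a natural number (proof-only spec function)
def bitsAsc (M : Nat) : List Nat :=
  if h : M = 0 then []
  else (if M % 2 = 1 then [0] else []) ++ (bitsAsc (M / 2)).map (· + 1)
termination_by M
decreasing_by exact Nat.div_lt_self (Nat.pos_of_ne_zero h) one_lt_two

theorem shift1 (k : Nat) : ((1:Int) <<< k) = ((2 ^ k : Nat) : Int) := by
  simp [Int.shiftLeft_eq]

theorem compl_testBit : ∀ (len R i : Nat), R < 2 ^ len → i < len →
    (2 ^ len - 1 - R).testBit i = !R.testBit i := by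
  intro len
  induction len with
  | zero => intro R i _ hi; omega
  | succ l ih =>
    intro R i hR hi
    have hP : (2:Nat) ^ (l + 1) = 2 * 2 ^ l := by ring
    cases i with
    | zero =>
      simp only [Nat.testBit_zero]
      rcases Nat.mod_two_eq_zero_or_one R with h | h <;> simp [h] <;> omega
    | succ j =>
      rw [show j + 1 = Nat.succ j from rfl, Nat.testBit_succ, Nat.testBit_succ]
      have hdiv : (2 ^ (l + 1) - 1 - R) / 2 = 2 ^ l - 1 - R / 2 := by omega
      rw [hdiv]
      exact ih (R / 2) j (by omega) (by omega)

theorem neg_emod (t len : Nat) :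
    (-((t : Int) + 1)) % ((2 ^ len : Nat) : Int) = ((2 ^ len - 1 - t % 2 ^ len : Nat) : Int) := by
  have hr : t % 2 ^ len < 2 ^ len := Nat.mod_lt _ (by positivity)
  have hqr : 2 ^ len * (t / 2 ^ len) + t % 2 ^ len = t := Nat.div_add_mod t (2 ^ len)
  have hc2 : ((2 ^ len : Nat) : Int) * ((t / 2 ^ len : Nat) : Int)
      + ((t % 2 ^ len : Nat) : Int) = (t : Int) := by exact_mod_cast hqr
  have key : (-((t : Int) + 1)) =
      ((2 ^ len - 1 - t % 2 ^ len : Nat) : Int)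
        + ((2 ^ len : Nat) : Int) * (-((t / 2 ^ len : Nat) : Int) - 1) := by
    have hc1 : ((2 ^ len - 1 - t % 2 ^ len : Nat) : Int)
        = ((2 ^ len : Nat) : Int) - 1 - ((t % 2 ^ len : Nat) : Int) := by omega
    rw [hc1]
    linear_combination hc2
  rw [key, Int.add_mul_emod_self_left, Int.emod_eq_of_lt (by omega) (by omega)]

-- the branch test of A agrees with a bit of n's remainder modulo 2^len
theorem cond_iff (n : Int) (len i : Nat) (hi : i < len) :
    (PySem.Int.band ((1:Int) <<< i) n ≠ 0) ↔
      ((PySem.Int.mod n ((1:Int) <<< len)).toNat.testBit i = true) := by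
  have hpos : (0:Int) < ((2 ^ len : Nat) : Int) := by
    exact_mod_cast (by positivity : (0:Nat) < 2 ^ len)
  rw [shift1 len, PySem.Int.mod_eq_emod_of_pos hpos]
  by_cases hn : 0 ≤ n
  · obtain ⟨N, rfl⟩ : ∃ N : Nat, n = (N : Int) := ⟨n.toNat, (Int.toNat_of_nonneg hn).symm⟩
    rw [shift1 i, PySem.Int.band_natCast]
    have hmod : ((N : Int) % ((2 ^ len : Nat) : Int)) = ((N % 2 ^ len : Nat) : Int) := by
      norm_cast
    rw [hmod, Int.toNat_natCast, Nat.testBit_mod_two_pow, Nat.two_pow_and]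
    cases h : N.testBit i <;> simp [h, hi, pow_ne_zero]
  · have hn' : n < 0 := by omega
    set t := (-n - 1).toNat with htdef
    have ht : n = -((t : Int) + 1) := by omega
    have hband : PySem.Int.band ((1:Int) <<< i) n
        = ((2 ^ i - (2 ^ i &&& t) : Nat) : Int) := by
      rw [shift1 i]
      unfold PySem.Int.band
      rw [if_pos (by positivity), if_neg (by omega)]
      rw [Int.toNat_natCast, ← htdef]
    rw [hband, ht, neg_emod t len, Int.toNat_natCast]
    rw [compl_testBit len _ i (Nat.mod_lt _ (by positivity)) hi, Nat.testBit_mod_two_pow]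
    rw [Nat.two_pow_and]
    cases h : t.testBit i <;> simp [h, hi, pow_ne_zero]

theorem bitsAsc_zero : bitsAsc 0 = [] := by rw [bitsAsc]; simp

theorem bitsAsc_double (q : Nat) : bitsAsc (2 * q) = (bitsAsc q).map (· + 1) := by
  rcases Nat.eq_zero_or_pos q with h | h
  · subst h; simp [bitsAsc_zero]
  · have h2 : 2 * q / 2 = q := by omega
    rw [bitsAsc, dif_neg (by omega), h2]
    simp [Nat.mul_mod_right]

theorem bitsAsc_filter : ∀ (B M : Nat), M < 2 ^ B →
    bitsAsc M = (List.range B).filter (fun i => M.testBit i) := by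
  intro B
  induction B with
  | zero =>
    intro M hM
    have : M = 0 := by simpa using hM
    subst this
    simp [bitsAsc_zero]
  | succ b ih =>
    intro M hM
    rcases Nat.eq_zero_or_pos M with h0 | h0
    · subst h0; simp [bitsAsc_zero, Nat.zero_testBit]
    · have hM2 : M / 2 < 2 ^ b := by
        have h2 : (2:Nat) ^ (b + 1) = 2 * 2 ^ b := by ring
        omega
      rw [bitsAsc, dif_neg (by omega), List.range_succ_eq_map, List.filter_cons]
      have hform : ((fun i => M.testBit i) ∘ Nat.succ) = fun i => (M / 2).testBit i := by
        funext j
        simp [Function.comp, Nat.testBit_succ]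
      rw [List.filter_map, hform, ← ih (M / 2) hM2]
      rcases Nat.mod_two_eq_zero_or_one M with h | h <;>
        simp [h, Nat.testBit_zero, Nat.succ_eq_add_one]

theorem and_two_mul_add_one (q : Nat) : (2 * q + 1) &&& (2 * q) = 2 * q := by
  have h := Nat.land_bit true q false q
  simpa [Nat.bit_true_apply, Nat.bit_false_apply, Nat.and_self] using h

theorem xor_two_mul_add_one (q : Nat) : (2 * q + 1) ^^^ (2 * q) = 1 := by
  have h := Nat.xor_bit true q false q
  simpa [Nat.bit_true_apply, Nat.bit_false_apply, Nat.xor_self] using h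

theorem and_two_mul (q : Nat) (hq : 0 < q) : (2 * q) &&& (2 * q - 1) = 2 * (q &&& (q - 1)) := by
  have h := Nat.land_bit false q true (q - 1)
  rw [show 2 * q - 1 = 2 * (q - 1) + 1 from by omega]
  simpa [Nat.bit_true_apply, Nat.bit_false_apply] using h

theorem xor_two_mul (a b : Nat) : (2 * a) ^^^ (2 * b) = 2 * (a ^^^ b) := by
  have h := Nat.xor_bit false a false b
  simpa [Nat.bit_false_apply] using h

theorem bl_pos (Y : Nat) (hY : Y ≠ 0) : 1 ≤ PySem.Int.bitLength ((Y : Nat) : Int) := by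
  rw [PySem.Int.bitLength_natCast (Nat.pos_of_ne_zero hY)]
  omega

theorem bl_double (Y : Nat) (hY : Y ≠ 0) :
    PySem.Int.bitLength ((2 * Y : Nat) : Int) = PySem.Int.bitLength ((Y : Nat) : Int) + 1 := by
  rw [PySem.Int.bitLength_natCast (by omega : 0 < 2 * Y)]
  rw [show 2 * Y / 2 = Y from by omega]

theorem core_step : ∀ M : Nat, M ≠ 0 →
    bitsAsc M = (PySem.Int.bitLength ((M ^^^ (M &&& (M - 1)) : Nat) : Int) - 1)
      :: bitsAsc (M &&& (M - 1)) := by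
  intro M
  induction M using Nat.strong_induction_on with
  | _ M ih =>
    intro hM
    rcases Nat.even_or_odd M with ⟨q, hq⟩ | ⟨q, hq⟩
    · have hq2 : M = 2 * q := by omega
      subst hq2
      have hqpos : 0 < q := by omega
      have hand : 2 * q &&& (2 * q - 1) = 2 * (q &&& (q - 1)) := and_two_mul q hqpos
      have hqq : q &&& (q - 1) ≤ q - 1 := Nat.and_le_right
      have hY : q ^^^ (q &&& (q - 1)) ≠ 0 := by
        intro hc
        have := Nat.xor_eq_zero.mp hc
        omega
      have hbl := bl_pos _ hY
      rw [bitsAsc_double q, ih q (by omega) (by omega)]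
      rw [hand, xor_two_mul, bl_double _ hY, bitsAsc_double]
      simp only [List.map_cons]
      congr 1
      omega
    · subst hq
      rw [show (2 * q + 1) - 1 = 2 * q from by omega, and_two_mul_add_one, xor_two_mul_add_one]
      have hbl1 : PySem.Int.bitLength ((1 : Nat) : Int) = 1 := by decide
      rw [hbl1, bitsAsc, dif_neg (by omega)]
      rw [show (2 * q + 1) / 2 = q from by omega]
      simp [show (2 * q + 1) % 2 = 1 from by omega, bitsAsc_double]

theorem altLoop_eq : ∀ (M : Nat) (tmp : List Int),
    getElemAltLoop (M : Int) tmp = tmp ++ (bitsAsc M).map (fun i : Nat => (i : Int)) := by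
  intro M
  induction M using Nat.strong_induction_on with
  | _ M ih =>
    intro tmp
    rcases Nat.eq_zero_or_pos M with h0 | h0
    · rw [h0, getElemAltLoop, dif_neg (by norm_num)]
      simp [bitsAsc_zero]
    · rw [getElemAltLoop, dif_pos (by exact_mod_cast h0)]
      have hm1 : ((M : Int) - 1) = ((M - 1 : Nat) : Int) := by omega
      have hband : PySem.Int.band (M : Int) ((M : Int) - 1) = ((M &&& (M - 1) : Nat) : Int) := by
        rw [hm1]
        exact PySem.Int.band_natCast M (M - 1)
      have hxor : PySem.Int.bxor (M : Int) ((M &&& (M - 1) : Nat) : Int)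
          = ((M ^^^ (M &&& (M - 1)) : Nat) : Int) :=
        PySem.Int.bxor_natCast M (M &&& (M - 1))
      have hlt : M &&& (M - 1) < M := by
        have h := Nat.and_le_right (n := M) (m := M - 1)
        omega
      have hY : M ^^^ (M &&& (M - 1)) ≠ 0 := by
        intro hc
        have := Nat.xor_eq_zero.mp hc
        omega
      have hbl := bl_pos _ hY
      simp only [hband, hxor]
      rw [ih (M &&& (M - 1)) hlt, core_step M (by omega)]
      have hcast : ((PySem.Int.bitLength ((M ^^^ (M &&& (M - 1)) : Nat) : Int) : Int) - 1)
          = ((PySem.Int.bitLength ((M ^^^ (M &&& (M - 1)) : Nat) : Int) - 1 : Nat) : Int) := by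
        omega
      simp [hcast, List.map_cons]

theorem loopA_eq (len : Nat) (n : Int) : ∀ (k i : Nat) (leftmost : Int) (tmp : List Int),
    i + k = len →
    getElemLoop len n i leftmost tmp =
      (tmp ++ ((List.range' i k).filter
          (fun j : Nat => decide (PySem.Int.band ((1:Int) <<< j) n ≠ 0))).map (fun j : Nat => (j : Int)),
       leftmost + (((List.range' i k).filter
          (fun j : Nat => decide (PySem.Int.band ((1:Int) <<< j) n ≠ 0))).length : Int)) := by
  intro k
  induction k with
  | zero =>
    intro i leftmost tmp h
    rw [getElemLoop, dif_neg (by omega)]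
    simp [List.range']
  | succ k ih =>
    intro i leftmost tmp h
    rw [getElemLoop, dif_pos (by omega), List.range'_succ]
    by_cases hc : PySem.Int.band ((1:Int) <<< i) n ≠ 0
    · rw [if_pos hc, ih (i + 1) (leftmost + 1) _ (by omega)]
      refine Prod.ext ?_ ?_ <;>
        simp [List.filter_cons, hc, List.append_assoc] <;> omega
    · rw [if_neg hc, ih (i + 1) leftmost _ (by omega)]
      push_neg at hc
      refine Prod.ext ?_ ?_ <;>
        simp [List.filter_cons, hc]

-- ===== VERDICT (by name: the statement is the Claim_ definition above) =====
theorem get_elem_spec : Claim_equal_get_elem := by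
  unfold Claim_equal_get_elem
  intro elems n _dom
  unfold Spec_get_elem
  have hpos : (0:Int) < ((2 ^ elems.length : Nat) : Int) := by
    exact_mod_cast (by positivity : (0:Nat) < 2 ^ elems.length)
  have hpos' : (0:Int) < ((1:Int) <<< elems.length) := by rw [shift1]; exact hpos
  have hm0 : 0 ≤ PySem.Int.mod n ((1:Int) <<< elems.length) := PySem.Int.mod_nonneg n hpos'
  have hmlt : PySem.Int.mod n ((1:Int) <<< elems.length) < ((2 ^ elems.length : Nat) : Int) := by
    rw [← shift1]
    exact PySem.Int.mod_lt n hpos' 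
  set M := (PySem.Int.mod n ((1:Int) <<< elems.length)).toNat with hMdef
  have hmM : PySem.Int.mod n ((1:Int) <<< elems.length) = (M : Int) := by omega
  have hMlt : M < 2 ^ elems.length := by omega
  have hfc : (List.range elems.length).filter
        (fun j : Nat => decide (PySem.Int.band ((1:Int) <<< j) n ≠ 0))
      = (List.range elems.length).filter (fun i => M.testBit i) := by
    apply List.filter_congr
    intro j hj
    have h1 := cond_iff n elems.length j (List.mem_range.mp hj)
    rw [← hMdef] at h1
    simp [h1]
  have hA : get_elem elems n
      = (((List.range elems.length).filter (fun i => M.testBit i)).map (fun j : Nat => (j : Int)),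
         -1 + (((List.range elems.length).filter (fun i => M.testBit i)).length : Int)) := by
    unfold get_elem
    rw [loopA_eq elems.length n elems.length 0 (-1) [] (by omega),
        show List.range' 0 elems.length = List.range elems.length from
          List.range_eq_range'.symm,
        hfc]
    simp
  have hB : get_elem_alt elems n
      = (((List.range elems.length).filter (fun i => M.testBit i)).map (fun j : Nat => (j : Int)),
         (((List.range elems.length).filter (fun i => M.testBit i)).length : Int) - 1) := by
    simp only [get_elem_alt]
    rw [hmM, altLoop_eq M [], bitsAsc_filter elems.length M hMlt]
    simp only [List.nil_append, List.length_map]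
  rw [hA, hB]
  refine Prod.ext ?_ ?_
  · rfl
  · dsimp only
    omega
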